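-- pv_equiv track=rewrite | github.com/jorzaiy/Threadloom | backend/runtime_store.py | filter_committed_history_items
-- ===== SOURCE A (Python) =====
-- def is_complete_assistant_item(item: dict) -> bool:
--     if item.get('role') != 'assistant':
--         return True
--     return item.get('completion_status', 'complete') == 'complete'
--
-- def filter_committed_history_items(items: list[dict]) -> list[dict]:
--     committed: list[dict] = []
--     for item in items or []:
--         if not isinstance(item, dict):
--             continue
--         if item.get('role') == 'assistant' and not is_complete_assistant_item(item):
--             if committed and isinstance(committed[-1], dict) and committed[-1].get('role') == 'user':
--                 committed.pop()
--             continue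
--         committed.append(item)
--     return committed
-- ===== SOURCE B (Python) =====
-- def filter_committed_history_items(items: list[dict]) -> list[dict]:
--     # Single reversed pass with a counter of pending incomplete-assistant pops,
--     # instead of a forward stack with conditional pop.
--     out: list[dict] = []
--     debt = 0
--     for item in reversed(items or []):
--         if not isinstance(item, dict):
--             continue
--         if item.get('role') == 'assistant' and item.get('completion_status', 'complete') != 'complete':
--             debt += 1
--         elif item.get('role') == 'user' and debt > 0:
--             debt -= 1
--         else:
--             debt = 0
--             out.append(item)
--     out.reverse()
--     return out
-- ===== Notes on version B (the rewrite author's own statement) =====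
-- stated objective: alternative
-- what changed: Replaces the forward stack with conditional pop by a single reversed pass that keeps a counter of pending incomplete-assistant pops (each pending pop cancels the nearest preceding user), building the result back-to-front.
import Mathlib
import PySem

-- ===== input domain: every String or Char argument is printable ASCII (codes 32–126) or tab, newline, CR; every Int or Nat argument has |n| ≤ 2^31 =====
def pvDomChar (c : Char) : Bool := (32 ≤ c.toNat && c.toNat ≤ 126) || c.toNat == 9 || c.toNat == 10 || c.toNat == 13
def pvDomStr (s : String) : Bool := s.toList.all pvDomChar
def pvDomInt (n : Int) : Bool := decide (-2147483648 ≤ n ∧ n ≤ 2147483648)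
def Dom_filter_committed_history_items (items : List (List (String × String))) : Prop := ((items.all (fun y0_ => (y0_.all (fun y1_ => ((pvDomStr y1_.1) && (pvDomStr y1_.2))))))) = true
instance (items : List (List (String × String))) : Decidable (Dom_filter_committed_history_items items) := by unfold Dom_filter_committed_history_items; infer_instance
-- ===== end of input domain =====

-- B replaces A's forward stack with conditional pop by a single reversed pass
-- keeping a counter of pending incomplete-assistant pops (objective: alternative).

-- dict.get(k) / dict.get(k, default) on an item (dict → assoc list, first match)
def pvGet (item : List (String × String)) (k : String) : Option String :=
  (PySem.Dict.mk item).get? k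

def pvGetD (item : List (String × String)) (k dflt : String) : String :=
  (PySem.Dict.mk item).getD k dflt

-- ===== PORT A =====
def is_complete_assistant_item (item : List (String × String)) : Bool :=
  if pvGet item "role" != some "assistant" then true
  else pvGetD item "completion_status" "complete" == "complete"

-- one iteration of A's loop body ('isinstance(item, dict)' is always true here;
-- 'items or []' is 'items' for a list argument)
def pvStepA (committed : List (List (String × String))) (item : List (String × String)) :
    List (List (String × String)) :=
  if pvGet item "role" == some "assistant" && !is_complete_assistant_item item then
    match committed.getLast? with
    | some last => if pvGet last "role" == some "user" then committed.dropLast else committed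
    | none => committed
  else committed.concat item

def filter_committed_history_items (items : List (List (String × String))) : List (List (String × String)) :=
  items.foldl pvStepA []

-- ===== PORT B =====
-- one iteration of B's reversed loop: state = (out, debt)
def pvStepB (st : List (List (String × String)) × Int) (item : List (String × String)) :
    List (List (String × String)) × Int :=
  if pvGet item "role" == some "assistant" && pvGetD item "completion_status" "complete" != "complete" then
    (st.1, st.2 + 1)
  else if pvGet item "role" == some "user" && decide (st.2 > 0) then
    (st.1, st.2 - 1)
  else (st.1.concat item, 0)

def filter_committed_history_items_alt (items : List (List (String × String))) : List (List (String × String)) :=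
  ((items.reverse.foldl pvStepB ([], 0)).1).reverse

-- ===== PRECONDITION & SPEC =====
def Spec_filter_committed_history_items (items : List (List (String × String))) (out : List (List (String × String))) : Prop := out = filter_committed_history_items_alt items
instance (items : List (List (String × String))) (out : List (List (String × String))) : Decidable (Spec_filter_committed_history_items items out) := by unfold Spec_filter_committed_history_items; infer_instance

-- ===== CLAIM (what is proved, stated in full; the proofs are below) =====
def Claim_equal_filter_committed_history_items : Prop := ∀ (items : List (List (String × String))), Dom_filter_committed_history_items items → Spec_filter_committed_history_items items (filter_committed_history_items items)

-- ===== LEMMAS AND PROOFS =====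

def pvUser (item : List (String × String)) : Bool := pvGet item "role" == some "user"

def pvInc (item : List (String × String)) : Bool :=
  pvGet item "role" == some "assistant" && pvGetD item "completion_status" "complete" != "complete"

-- right-to-left characterisation: (kept items, pending pops at the left end)
def pvG : List (List (String × String)) → List (List (String × String)) × Nat
  | [] => ([], 0)
  | x :: xs =>
    let p := pvG xs
    if pvInc x then (p.1, p.2 + 1)
    else if pvUser x ∧ p.2 > 0 then (p.1, p.2 - 1)
    else (x :: p.1, 0)

-- pop up to n trailing users
def pvPop : List (List (String × String)) → Nat → List (List (String × String))
  | acc, 0 => acc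
  | acc, d + 1 =>
    match acc.getLast? with
    | some last => if pvUser last then pvPop acc.dropLast d else acc
    | none => acc

lemma pvPop_nil (d : Nat) : pvPop [] d = [] := by
  cases d <;> simp [pvPop]

lemma pvPop_last_not_user (acc : List (List (String × String))) (l : List (String × String))
    (h : acc.getLast? = some l) (hu : pvUser l = false) (d : Nat) : pvPop acc d = acc := by
  cases d <;> simp [pvPop, h, hu]

lemma pvPop_concat_user (acc : List (List (String × String))) (x : List (String × String))
    (hu : pvUser x = true) (d : Nat) : pvPop (acc.concat x) (d + 1) = pvPop acc d := by
  simp [pvPop, hu]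

lemma pvInc_eq (x : List (String × String)) :
    (pvGet x "role" == some "assistant" && !is_complete_assistant_item x) = pvInc x := by
  simp only [pvInc, is_complete_assistant_item]
  by_cases h : pvGet x "role" = some "assistant" <;> simp [h, bne]

lemma foldA (items : List (List (String × String))) :
    ∀ acc, items.foldl pvStepA acc = pvPop acc (pvG items).2 ++ (pvG items).1 := by
  induction items with
  | nil => intro acc; simp [pvG, pvPop]
  | cons x xs ih =>
    intro acc
    rw [List.foldl_cons, ih]
    show _ = pvPop acc (pvG (x :: xs)).2 ++ (pvG (x :: xs)).1
    simp only [pvG]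
    by_cases hinc : pvInc x
    · -- incomplete assistant: A pops one trailing user, B counts a debt
      simp only [hinc, if_pos]
      have hstep : pvStepA acc x =
          (match acc.getLast? with
           | some last => if pvGet last "role" == some "user" then acc.dropLast else acc
           | none => acc) := by
        simp [pvStepA, pvInc_eq, hinc]
      rw [hstep]
      cases h : acc.getLast? with
      | none =>
        have : acc = [] := List.getLast?_eq_none_iff.mp h
        subst this
        simp [pvPop_nil, pvPop]
      | some last =>
        by_cases hu : pvGet last "role" = some "user"
        · have hpp : pvPop acc ((pvG xs).2 + 1) = pvPop acc.dropLast (pvG xs).2 := by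
            rw [pvPop]; simp [h, pvUser, hu]
          simp [hu, hpp]
        · have hu' : pvUser last = false := by simp [pvUser, hu]
          have hb : (pvGet last "role" == some "user") = false := hu'
          simp only [hb, Bool.false_eq_true, if_false]
          rw [pvPop_last_not_user acc last h hu', pvPop_last_not_user acc last h hu']
    · by_cases huser : pvUser x ∧ (pvG xs).2 > 0
      · -- user cancelled by a pending pop
        simp only [hinc, if_pos huser]
        have hstep : pvStepA acc x = acc.concat x := by
          simp [pvStepA, pvInc_eq, hinc]
        rw [hstep]
        obtain ⟨hu, hd⟩ := huser
        obtain ⟨d, hd'⟩ := Nat.exists_eq_add_of_lt hd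
        simp only [Nat.zero_add] at hd'
        rw [hd', pvPop_concat_user acc x hu d]
        simp
      · -- kept item
        simp only [hinc, if_neg huser]
        have hstep : pvStepA acc x = acc.concat x := by
          simp [pvStepA, pvInc_eq, hinc]
        rw [hstep]
        show pvPop (acc.concat x) (pvG xs).2 ++ (pvG xs).1 = pvPop acc 0 ++ x :: (pvG xs).1
        have hpop : pvPop (acc.concat x) (pvG xs).2 = acc.concat x := by
          cases hdd : (pvG xs).2 with
          | zero => simp [pvPop]
          | succ d =>
            have hu : pvUser x = false := by
              by_cases h : pvUser x
              · exact absurd ⟨h, by omega⟩ huser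
              · simpa using h
            exact pvPop_last_not_user _ x (by simp) hu _
        rw [hpop]
        simp [pvPop]

lemma foldB (items : List (List (String × String))) :
    items.foldr (fun x st => pvStepB st x) ([], 0) = ((pvG items).1.reverse, ((pvG items).2 : Int)) := by
  induction items with
  | nil => simp [pvG]
  | cons x xs ih =>
    rw [List.foldr_cons, ih]
    show pvStepB _ x = _
    simp only [pvG]
    by_cases hinc : pvInc x
    · have ht : (pvGet x "role" == some "assistant" && pvGetD x "completion_status" "complete" != "complete") = true := hinc
      simp [pvStepB, ht, hinc]
    · have hc : (pvGet x "role" == some "assistant" && pvGetD x "completion_status" "complete" != "complete") = false := by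
        simpa [pvInc] using hinc
      by_cases huser : pvUser x ∧ (pvG xs).2 > 0
      · obtain ⟨hu, hd⟩ := huser
        have h1 : pvGet x "role" = some "user" := by simpa [pvUser] using hu
        simp [pvStepB, h1, hinc, hu, hd]
      · have hN : ¬ (pvGet x "role" = some "user" ∧ 0 < (pvG xs).2) := by
          rintro ⟨h1, h2⟩
          exact huser ⟨by simp [pvUser, h1], h2⟩
        simp [pvStepB, hc, huser, hinc, hN]

-- ===== VERDICT (by name: the statement is the Claim_ definition above) =====
theorem filter_committed_history_items_spec : Claim_equal_filter_committed_history_items := by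
  intro items _
  show filter_committed_history_items items = filter_committed_history_items_alt items
  unfold filter_committed_history_items filter_committed_history_items_alt
  rw [List.foldl_reverse, foldB, foldA]
  simp [pvPop_nil]
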